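-- pv_equiv track=rewrite | github.com/Rajasekhar1131997/TIP102_Sessions | Unit_7/Week7Session1_SPSV1.py | count_suits_recursive
-- ===== SOURCE A (Python) =====
-- def count_suits_recursive(suits):
--     if not suits:
--         return 0
--     first = suits[0]
--     rest = count_suits_recursive(suits[1:])
--     if first in suits[1:]:
--         return rest
--     else:
--         return 1 + rest
-- ===== SOURCE B (Python) =====
-- def count_suits_recursive(suits):
--     seen = set()
--     for s in suits:
--         seen.add(s)
--     return len(seen)
-- ===== Notes on version B (the rewrite author's own statement) =====
-- stated objective: simpler
-- what changed: Replaced the recursion over suits[1:] with its O(n^2) membership test against the tail by a single forward loop accumulating distinct values in a set and returning its size.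
import Mathlib
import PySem

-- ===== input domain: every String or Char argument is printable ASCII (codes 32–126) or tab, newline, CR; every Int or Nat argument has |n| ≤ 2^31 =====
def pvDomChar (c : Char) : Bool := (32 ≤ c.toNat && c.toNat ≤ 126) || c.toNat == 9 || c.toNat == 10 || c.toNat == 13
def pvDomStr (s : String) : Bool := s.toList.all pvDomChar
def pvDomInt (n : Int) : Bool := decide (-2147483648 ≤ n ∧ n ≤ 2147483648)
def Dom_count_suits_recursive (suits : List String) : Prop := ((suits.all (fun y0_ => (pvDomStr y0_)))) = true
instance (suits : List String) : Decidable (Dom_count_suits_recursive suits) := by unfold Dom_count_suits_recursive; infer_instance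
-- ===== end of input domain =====

-- B replaces A's recursion (with its membership test against the tail) by one forward
-- pass accumulating distinct values in a set; same return value, simpler and faster.

-- ===== PORT A =====
-- Python A: if not suits: return 0; first = suits[0]; rest = count_suits_recursive(suits[1:]);
--           return rest if first in suits[1:] else 1 + rest
def count_suits_recursive (suits : List String) : Int :=
  match suits with
  | [] => 0
  | first :: tl =>
    let rest := count_suits_recursive tl
    if first ∈ tl then rest else 1 + rest

-- ===== PORT B =====
-- Python B: seen = set(); for s in suits: seen.add(s); return len(seen)
def count_suits_recursive_alt (suits : List String) : Int :=
  let seen := suits.foldl PySem.Set.add PySem.Set.empty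
  (PySem.Set.len seen : Int)

-- ===== PRECONDITION & SPEC =====
def Spec_count_suits_recursive (suits : List String) (out : Int) : Prop := out = count_suits_recursive_alt suits
instance (suits : List String) (out : Int) : Decidable (Spec_count_suits_recursive suits out) := by unfold Spec_count_suits_recursive; infer_instance

-- ===== CLAIM (what is proved, stated in full; the proofs are below) =====
def Claim_equal_count_suits_recursive : Prop := ∀ (suits : List String), Dom_count_suits_recursive suits → Spec_count_suits_recursive suits (count_suits_recursive suits)

-- ===== LEMMAS AND PROOFS =====

-- A computes the length of Mathlib's dedup (which keeps the LAST occurrence, exactly A's test).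
theorem countA_eq_dedup_length (l : List String) :
    count_suits_recursive l = (l.dedup.length : Int) := by
  induction l with
  | nil => simp [count_suits_recursive]
  | cons a tl ih =>
    by_cases h : a ∈ tl
    · simp [count_suits_recursive, h, ih, List.dedup_cons_of_mem h]
    · simp [count_suits_recursive, h, ih, List.dedup_cons_of_notMem h]
      omega

-- B's seen set is PySem.Set.ofList, whose length equals dedup's length (both nodup, same members).
theorem setLen_eq_dedup_length (l : List String) :
    (PySem.Set.len (l.foldl PySem.Set.add PySem.Set.empty) : Int) = (l.dedup.length : Int) := by
  have hfold : l.foldl PySem.Set.add PySem.Set.empty = PySem.Set.ofList l :=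
    (PySem.Set.ofList_eq_foldl l).symm
  have hperm : List.Perm (PySem.Set.ofList l) l.dedup := by
    rw [List.perm_ext_iff_of_nodup (PySem.Set.nodup_ofList l) l.nodup_dedup]
    intro x
    rw [PySem.Set.mem_ofList, List.mem_dedup]
  rw [hfold]
  simp [PySem.Set.len, hperm.length_eq]

-- ===== VERDICT (by name: the statement is the Claim_ definition above) =====
theorem count_suits_recursive_spec : Claim_equal_count_suits_recursive := by
  intro suits _
  unfold Spec_count_suits_recursive count_suits_recursive_alt
  rw [countA_eq_dedup_length, ← setLen_eq_dedup_length]
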